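-- pv_equiv track=rewrite | github.com/hwstar/BOMtools | mergers/eagle-BOM-merge/bommerge-eagle.py | pack_ref_designators
-- ===== SOURCE A (Python) =====
-- def group_consecutives(vals, step=1):
--     """Return list of consecutive lists of numbers from vals (number list)."""
--     run = []
--     result = [run]
--     expect = None
--     for v in vals:
--         if (v == expect) or (expect is None):
--             run.append(v)
--         else:
--             run = [v]
--             result.append(run)
--         expect = v + step
--     return result
--
-- def pack_ref_designators(inplist):
--
--     # Strip off the prefix
--     i = 0
--     prefix = ''
--     nlist = []
--     for item in inplist:
--         for i in range(len(item)):
--             if item[i] in '0123456789':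
--                 prefix = item[0:i]
--                 nlist.append(int(item[i:]))
--                 break
--
--     # Sort the numbers
--     slist = group_consecutives(sorted(nlist))
--     outlist = []
--     for item in slist:
--         if len(item) > 2: # If 3 more more consecutive values output a range Xyy-Xzz
--             outlist.append(prefix + str(item[0]) + '-' + prefix + str(item[-1]))
--         else:
--             for i,val in enumerate(item):
--                 outlist.append(prefix+str(val))
--
--     return outlist
-- ===== SOURCE B (Python) =====
-- def pack_ref_designators(inplist):
--     # Parse: for each item, (text before its first digit, int of the rest); items with no digit are skipped.
--     parsed = [(item[:i], int(item[i:]))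
--               for item, i in ((item,
--                                next((j for j, c in enumerate(item) if c in '0123456789'), -1))
--                               for item in inplist)
--               if i >= 0]
--     prefix = parsed[-1][0] if parsed else ''
--     nums = sorted(n for _, n in parsed)
--
--     def take_run(expect, ns):
--         """Split ns into its longest prefix expect, expect+1, ... and the rest."""
--         if ns and ns[0] == expect:
--             h, t = take_run(ns[0] + 1, ns[1:])
--             return [ns[0]] + h, t
--         return [], ns
--
--     def emit(ns):
--         """Peel off the leading maximal consecutive run, render it, recurse on the rest."""
--         if not ns:
--             return []
--         h, rest = take_run(ns[0] + 1, ns[1:])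
--         head = [ns[0]] + h
--         if len(head) > 2:
--             return [prefix + str(head[0]) + '-' + prefix + str(head[-1])] + emit(rest)
--         return [prefix + str(v) for v in head] + emit(rest)
--
--     return emit(nums)
-- ===== Notes on version B (the rewrite author's own statement) =====
-- stated objective: alternative
-- what changed: The stateful expect/step scan that builds an intermediate list-of-runs (group_consecutives) plus a second rendering pass is replaced by a direct recursion that peels off the leading maximal consecutive run and renders it immediately, and the nested parse loop with break is replaced by a single comprehension over first-digit indices with a last-element prefix lookup.
import Mathlib
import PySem

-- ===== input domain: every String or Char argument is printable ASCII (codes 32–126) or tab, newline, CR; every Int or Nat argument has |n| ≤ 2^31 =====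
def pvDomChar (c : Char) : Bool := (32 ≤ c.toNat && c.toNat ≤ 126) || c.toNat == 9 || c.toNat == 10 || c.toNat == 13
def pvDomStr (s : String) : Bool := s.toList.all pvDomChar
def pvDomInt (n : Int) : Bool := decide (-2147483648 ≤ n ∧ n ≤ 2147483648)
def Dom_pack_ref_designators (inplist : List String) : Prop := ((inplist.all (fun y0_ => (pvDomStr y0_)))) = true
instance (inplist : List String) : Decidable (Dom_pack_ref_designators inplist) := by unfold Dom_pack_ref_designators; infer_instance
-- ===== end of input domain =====

-- B replaces the two-phase run grouping (stateful expect-scan building a list of runs, then a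
-- render pass) by a direct recursion peeling off one maximal consecutive run at a time, and the
-- nested parse loop by a comprehension; same values, same asymptotic cost (objective: alternative).


-- ===== PORT A =====

-- A's inner loop "for i in range(len(item)): if item[i] in '0123456789': … break":
-- scan the characters left to right carrying the index, stop at the first digit.
def pvScanDigitA : List Char → Nat → Option Nat
  | [], _ => none
  | c :: cs, i => if ("0123456789".toList.contains c) then some i else pvScanDigitA cs (i + 1)

-- one iteration of A's outer parse loop; state = (prefix, nlist).
-- int(item[i:]) is PySem.Int.ofChars?; none = ValueError, excluded by Pre_ (getD 0 is never read under Pre_).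
def pvParseStepA (st : String × List Int) (item : String) : String × List Int :=
  match pvScanDigitA item.toList 0 with
  | none => st
  | some i =>
      (String.ofList (PySem.List.slice item.toList (some (0 : Int)) (some (i : Int))),
       st.2 ++ [(PySem.Int.ofChars? (PySem.List.slice item.toList (some (i : Int)) none)).getD 0])

-- one iteration of group_consecutives' loop.  Python appends to `run` in place, which also
-- mutates the last element of `result`; modelled as state (completed, run, expect) with
-- result = completed ++ [run].
def pvGcStep (step : Int) (st : List (List Int) × List Int × Option Int) (v : Int) :
    List (List Int) × List Int × Option Int :=
  match st with
  | (completed, run, expect) =>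
    if some v = expect ∨ expect = none then (completed, run ++ [v], some (v + step))
    else (completed ++ [run], [v], some (v + step))

def group_consecutives (vals : List Int) (step : Int) : List (List Int) :=
  match vals.foldl (pvGcStep step) ([], [], none) with
  | (completed, run, _) => completed ++ [run]

def pack_ref_designators (inplist : List String) : List String :=
  let st := inplist.foldl pvParseStepA ("", [])
  let slist := group_consecutives (PySem.List.sorted st.2 (fun x => x) false) 1
  slist.foldl (fun outlist item =>
    if item.length > 2 then
      outlist ++ [st.1 ++ PySem.Int.toStr (PySem.List.pyGetD item 0 0) ++ "-" ++
                  st.1 ++ PySem.Int.toStr (PySem.List.pyGetD item (-1) 0)]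
    else
      (PySem.List.enumerate item 0).foldl
        (fun o iv => o ++ [st.1 ++ PySem.Int.toStr iv.2]) outlist) []

-- ===== PORT B =====

-- B's "next((j for j, c in enumerate(item) if c in '0123456789'), -1)"
-- (the -1 default together with the `if i >= 0` filter is exactly Option none).
def pvFirstDigitB (item : String) : Option Nat :=
  item.toList.findIdx? (fun c => "0123456789".toList.contains c)

-- B's comprehension element: (item[:i], int(item[i:])).  item[:i]/item[i:] with
-- 0 ≤ i ≤ len are take/drop (PySem.List.slice_to_natCast / slice_from_natCast);
-- ofChars? none = ValueError, excluded by Pre_.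
def pvParseB (item : String) : Option (String × Int) :=
  (pvFirstDigitB item).map (fun i =>
    (String.ofList (item.toList.take i), (PySem.Int.ofChars? (item.toList.drop i)).getD 0))

-- B's take_run: longest prefix expect, expect+1, … of ns, and the rest.
def pvTakeRun (expect : Int) : List Int → List Int × List Int
  | [] => ([], [])
  | v :: rest =>
    if v = expect then
      let p := pvTakeRun (v + 1) rest
      (v :: p.1, p.2)
    else ([], v :: rest)

-- B's emit: peel the leading maximal run, render it, recurse on the (shorter) rest.
-- The fuel argument (started at the list length, strictly decreasing) only makes the
-- recursion structural; it never runs out, since the remainder shrinks at every step.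
def pvEmitBGo (pfx : String) : Nat → List Int → List String
  | 0, _ => []
  | _ + 1, [] => []
  | fuel + 1, v :: ns =>
    let p := pvTakeRun (v + 1) ns
    let head := v :: p.1
    (if head.length > 2 then
       [pfx ++ PySem.Int.toStr (PySem.List.pyGetD head 0 0) ++ "-" ++
        pfx ++ PySem.Int.toStr (PySem.List.pyGetD head (-1) 0)]
     else head.map (fun w => pfx ++ PySem.Int.toStr w)) ++ pvEmitBGo pfx fuel p.2

def pack_ref_designators_alt (inplist : List String) : List String :=
  let parsed := inplist.filterMap pvParseB
  let pfx := (parsed.getLast?).elim "" Prod.fst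
  let nums := PySem.List.sorted (parsed.map Prod.snd) (fun x => x) false
  pvEmitBGo pfx nums.length nums

-- ===== PRECONDITION & SPEC =====
-- Pre_ excludes exactly the inputs on which Python A raises ValueError: an item whose text
-- from its first digit onward is not a valid int literal (e.g. "R1A"); B raises there too.
def Pre_pack_ref_designators (inplist : List String) : Prop :=
  inplist.all (fun item =>
    ((item.toList.findIdx? (fun c => "0123456789".toList.contains c)).elim true
      (fun i => (PySem.Int.ofChars? (item.toList.drop i)).isSome))) = true
instance (inplist : List String) : Decidable (Pre_pack_ref_designators inplist) := by
  unfold Pre_pack_ref_designators; infer_instance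

def pvWitness_pack_ref_designators : List String := ["R1", "R2", "R3", "R7", "C10"]

def Spec_pack_ref_designators (inplist : List String) (out : List String) : Prop := out = pack_ref_designators_alt inplist
instance (inplist : List String) (out : List String) : Decidable (Spec_pack_ref_designators inplist out) := by unfold Spec_pack_ref_designators; infer_instance

-- ===== CLAIM (what is proved, stated in full; the proofs are below) =====
def Claim_equal_pack_ref_designators : Prop := ∀ (inplist : List String), Dom_pack_ref_designators inplist → Pre_pack_ref_designators inplist → Spec_pack_ref_designators inplist (pack_ref_designators inplist)

-- ===== LEMMAS AND PROOFS =====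

-- ---- parse phase ----

theorem pvScanDigitA_eq (l : List Char) (i : Nat) :
    pvScanDigitA l i = (l.findIdx? (fun c => "0123456789".toList.contains c)).map (· + i) := by
  induction l generalizing i with
  | nil => simp [pvScanDigitA]
  | cons c cs ih =>
    simp only [pvScanDigitA, List.findIdx?_cons, ih (i + 1)]
    split
    · simp
    · cases cs.findIdx? (fun c => "0123456789".toList.contains c) <;>
        simp [Nat.add_comm, Nat.add_left_comm]

theorem pvParseStepA_eq (st : String × List Int) (item : String) :
    pvParseStepA st item =
      match pvParseB item with
      | none => st
      | some pr => (pr.1, st.2 ++ [pr.2]) := by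
  simp only [pvParseStepA, pvParseB, pvFirstDigitB, pvScanDigitA_eq]
  cases h : item.toList.findIdx? (fun c => "0123456789".toList.contains c) with
  | none => simp
  | some i =>
    simp [PySem.List.slice_zero_start, PySem.List.slice_to_natCast,
      PySem.List.slice_from_natCast]

theorem pvParseFold (l : List String) (p : String) (ns : List Int) :
    l.foldl pvParseStepA (p, ns) =
      (((l.filterMap pvParseB).getLast?).elim p Prod.fst,
       ns ++ (l.filterMap pvParseB).map Prod.snd) := by
  induction l generalizing p ns with
  | nil => simp
  | cons item l ih =>
    simp only [List.foldl_cons, pvParseStepA_eq]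
    cases h : pvParseB item with
    | none => simp [h, ih]
    | some pr =>
      simp only [List.filterMap_cons, h, ih]
      cases h2 : (l.filterMap pvParseB).getLast? <;>
        simp [List.getLast?_cons, h2, List.append_assoc]

-- ---- output phase: A's rendering of one run ----

def pvEmitRun (pfx : String) (run : List Int) : List String :=
  if run.length > 2 then
    [pfx ++ PySem.Int.toStr (PySem.List.pyGetD run 0 0) ++ "-" ++
     pfx ++ PySem.Int.toStr (PySem.List.pyGetD run (-1) 0)]
  else run.map (fun w => pfx ++ PySem.Int.toStr w)

theorem pvOutFold (pfx : String) (slist : List (List Int)) (acc : List String) :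
    slist.foldl (fun outlist item =>
      if item.length > 2 then
        outlist ++ [pfx ++ PySem.Int.toStr (PySem.List.pyGetD item 0 0) ++ "-" ++
                    pfx ++ PySem.Int.toStr (PySem.List.pyGetD item (-1) 0)]
      else
        (PySem.List.enumerate item 0).foldl
          (fun o iv => o ++ [pfx ++ PySem.Int.toStr iv.2]) outlist) acc
    = acc ++ slist.flatMap (pvEmitRun pfx) := by
  rw [PySem.List.foldl_congr_mem slist _ (fun acc run => acc ++ pvEmitRun pfx run) acc]
  · exact PySem.List.foldl_append_eq_flatMap (pvEmitRun pfx) slist acc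
  · intro acc run _
    by_cases h : run.length > 2
    · simp [pvEmitRun, h]
    · rw [if_neg h, PySem.List.foldl_append_singleton_eq_map]
      have hmap : (PySem.List.enumerate run 0).map (fun iv => pfx ++ PySem.Int.toStr iv.2)
          = run.map (fun w => pfx ++ PySem.Int.toStr w) := by
        conv_rhs => rw [← PySem.List.map_snd_enumerate run 0]
        rw [List.map_map]
        rfl
      simp [pvEmitRun, h, hmap]

-- ---- grouping phase ----

theorem pvTakeRun_snd_length (expect : Int) (ns : List Int) :
    (pvTakeRun expect ns).2.length ≤ ns.length := by
  induction ns generalizing expect with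
  | nil => simp [pvTakeRun]
  | cons v rest ih =>
    simp only [pvTakeRun]
    split
    · exact Nat.le_succ_of_le (ih (v + 1))
    · simp


def pvFinish (st : List (List Int) × List Int × Option Int) : List (List Int) :=
  st.1 ++ [st.2.1]

theorem pvGcStep_hit (c : List (List Int)) (r : List Int) (v : Int) :
    pvGcStep 1 (c, r, some v) v = (c, r ++ [v], some (v + 1)) := by
  simp [pvGcStep]

theorem pvGcStep_miss (c : List (List Int)) (r : List Int) (e v : Int) (h : v ≠ e) :
    pvGcStep 1 (c, r, some e) v = (c ++ [r], [v], some (v + 1)) := by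
  simp [pvGcStep, h]

theorem pvGcStep_none (c : List (List Int)) (r : List Int) (v : Int) :
    pvGcStep 1 (c, r, none) v = (c, r ++ [v], some (v + 1)) := by
  simp [pvGcStep]

theorem pvTakeRun_cons_hit (v : Int) (rest : List Int) :
    pvTakeRun v (v :: rest) = (v :: (pvTakeRun (v + 1) rest).1, (pvTakeRun (v + 1) rest).2) := by
  simp [pvTakeRun]

theorem pvTakeRun_cons_miss (e v : Int) (rest : List Int) (h : v ≠ e) :
    pvTakeRun e (v :: rest) = ([], v :: rest) := by
  simp [pvTakeRun, h]

-- the expect-scan, started on expect = some e, consumes exactly the pvTakeRun run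
theorem pvGcRun (rest : List Int) (e : Int) (r : List Int) (c : List (List Int)) :
    pvFinish (rest.foldl (pvGcStep 1) (c, r, some e)) =
      (match pvTakeRun e rest with
       | (h, []) => c ++ [r ++ h]
       | (h, v :: t') => pvFinish (t'.foldl (pvGcStep 1) (c ++ [r ++ h], [v], some (v + 1)))) := by
  induction rest generalizing e r c with
  | nil => simp [pvTakeRun, pvFinish]
  | cons v rest ih =>
    rw [List.foldl_cons]
    by_cases hv : v = e
    · subst hv
      rw [pvGcStep_hit, ih (v + 1) (r ++ [v]) c, pvTakeRun_cons_hit]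
      rcases hp : pvTakeRun (v + 1) rest with ⟨h1, t⟩
      cases t <;> simp [List.append_assoc]
    · rw [pvGcStep_miss _ _ _ _ hv, pvTakeRun_cons_miss _ _ _ hv]
      simp

-- completed runs already in the state pass through the scan untouched
theorem pvGcShift (rest : List Int) (e : Int) (r : List Int) (c : List (List Int)) :
    pvFinish (rest.foldl (pvGcStep 1) (c, r, some e)) =
      c ++ pvFinish (rest.foldl (pvGcStep 1) ([], r, some e)) := by
  induction rest generalizing e r c with
  | nil => simp [pvFinish]
  | cons v rest ih =>
    rw [List.foldl_cons, List.foldl_cons]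
    by_cases hv : v = e
    · subst hv
      rw [pvGcStep_hit, pvGcStep_hit]
      exact ih (v + 1) (r ++ [v]) c
    · rw [pvGcStep_miss _ _ _ _ hv, pvGcStep_miss _ _ _ _ hv]
      rw [ih (v + 1) [v] (c ++ [r]), ih (v + 1) [v] ([] ++ [r])]
      simp [List.append_assoc]

theorem pvGcCons (v : Int) (rest : List Int) :
    group_consecutives (v :: rest) 1
      = pvFinish (rest.foldl (pvGcStep 1) ([], [v], some (v + 1))) := by
  rw [group_consecutives, List.foldl_cons, pvGcStep_none]
  rfl

-- main bridge: rendering A's list of runs = B's direct recursion (any sufficient fuel)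
theorem pvGcEmit (pfx : String) : ∀ (fuel : Nat) (ns : List Int), ns.length ≤ fuel →
    (group_consecutives ns 1).flatMap (pvEmitRun pfx) = pvEmitBGo pfx fuel ns := by
  intro fuel
  induction fuel with
  | zero =>
    intro ns hns
    have : ns = [] := List.eq_nil_of_length_eq_zero (Nat.le_zero.mp hns)
    subst this
    simp [group_consecutives, pvEmitBGo, pvEmitRun]
  | succ fuel ih =>
    intro ns hns
    cases ns with
    | nil => simp [group_consecutives, pvEmitBGo, pvEmitRun]
    | cons v rest =>
      rcases hp : pvTakeRun (v + 1) rest with ⟨h1, t⟩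
      have htlen : t.length ≤ rest.length := by
        have := pvTakeRun_snd_length (v + 1) rest
        rw [hp] at this; exact this
      rw [pvGcCons, pvGcRun, hp]
      cases t with
      | nil =>
        simp only [pvEmitBGo, hp]
        cases fuel <;> simp [pvEmitRun, pvEmitBGo]
      | cons w t' =>
        show (pvFinish (t'.foldl (pvGcStep 1) ([] ++ [[v] ++ h1], [w], some (w + 1)))).flatMap
              (pvEmitRun pfx) = pvEmitBGo pfx (fuel + 1) (v :: rest)
        rw [pvGcShift, ← pvGcCons]
        have hrec : (group_consecutives (w :: t') 1).flatMap (pvEmitRun pfx)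
            = pvEmitBGo pfx fuel (w :: t') := by
          refine ih (w :: t') ?_
          simp only [List.length_cons] at htlen hns ⊢
          omega
        simp only [List.flatMap_append, hrec]
        simp only [pvEmitBGo, hp]
        simp [pvEmitRun]

-- ===== VERDICT (by name: the statement is the Claim_ definition above) =====
theorem pack_ref_designators_spec : Claim_equal_pack_ref_designators := by
  intro inplist _ _
  unfold Spec_pack_ref_designators
  show pack_ref_designators inplist = pack_ref_designators_alt inplist
  simp only [pack_ref_designators, pack_ref_designators_alt, pvParseFold, List.nil_append]
  rw [pvOutFold]
  simp only [List.nil_append]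
  exact pvGcEmit _ _ _ le_rfl
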